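-- pv_equiv track=rewrite | github.com/machinereading/koreansummary | src/models/correct.py | candidate_words
-- ===== SOURCE A (Python) =====
-- import itertools
-- from copy import deepcopy
--
-- def candidate_words(sys_word):
-- 	items = list(sys_word)
-- 	group = [(k, sum(1 for _ in vs)) for k, vs in itertools.groupby(items)]
-- 	check_index = []
-- 	for j, g in enumerate(group):
-- 		if g[1] > 2:
-- 			check_index.append(j)
-- 	if not check_index:
-- 		return []
--
-- 	comb = [[]]
-- 	for j in check_index:
-- 		count = group[j][1]
-- 		length = len(comb)
-- 		tmp = []
-- 		for c in range(count):
-- 			tmp += deepcopy(comb)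
-- 			for l in range(length):
-- 				tmp[l + length * c].append(c + 1)
-- 		comb = tmp
--
-- 	candidates = []
-- 	for c in comb:
-- 		word = ''
-- 		for i, alpha in enumerate(group):
-- 			if i in check_index:
-- 				word += alpha[0] * c[check_index.index(i)]
-- 			else:
-- 				word += alpha[0] * alpha[1]
-- 		candidates.append(word)
-- 	return candidates
-- ===== SOURCE B (Python) =====
-- import itertools
--
-- def candidate_words(sys_word):
--     group = [(k, sum(1 for _ in vs)) for k, vs in itertools.groupby(sys_word)]
--     if all(n <= 2 for _, n in group):
--         return []
--
--     def expand(i):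
--         if i == len(group):
--             return ['']
--         ch, n = group[i]
--         tails = expand(i + 1)
--         if n > 2:
--             return [ch * c + t for t in tails for c in range(1, n + 1)]
--         return [ch * n + t for t in tails]
--
--     return expand(0)
-- ===== Notes on version B (the rewrite author's own statement) =====
-- stated objective: simpler
-- what changed: Replaces A's staged pipeline (collect checked indices, build the combination table iteratively with deepcopy block-filling, then assemble each word with per-group check_index.index lookups) by one recursive pass over the run-length groups that builds the candidate words directly, with no combination table, no check_index list and no index lookups.
import Mathlib
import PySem

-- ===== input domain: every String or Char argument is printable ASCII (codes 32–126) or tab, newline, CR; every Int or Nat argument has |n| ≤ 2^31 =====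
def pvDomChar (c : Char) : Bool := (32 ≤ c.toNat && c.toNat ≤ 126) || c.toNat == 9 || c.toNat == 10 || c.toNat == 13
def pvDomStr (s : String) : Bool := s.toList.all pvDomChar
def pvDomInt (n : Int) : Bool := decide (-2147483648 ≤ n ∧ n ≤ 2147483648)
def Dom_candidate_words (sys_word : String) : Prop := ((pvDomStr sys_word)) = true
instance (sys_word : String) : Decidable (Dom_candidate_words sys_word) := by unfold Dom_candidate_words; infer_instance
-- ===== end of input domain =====

-- B replaces A's iterative deepcopy-based combination builder plus the separate
-- index-lookup word-assembly pass by a single recursive pass over the runs that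
-- builds the candidate words directly (objective: simpler).

-- ===== PORT A =====
-- run-length encoding, rendering of itertools.groupby with counts
-- (counts kept as Nat: Python's len is nonnegative; enumerate indices likewise Nat)
def pvGroup : List Char → List (Char × Nat)
  | [] => []
  | c :: rest =>
    match pvGroup rest with
    | [] => [(c, 1)]
    | (k, n) :: gs => if c = k then (k, n + 1) :: gs else (c, 1) :: (k, n) :: gs

def candidate_words (sys_word : String) : List String :=
  let group := pvGroup sys_word.toList
  let check_index := group.zipIdx.foldl
    (fun acc gj => if gj.1.2 > 2 then acc ++ [gj.2] else acc) []
  if check_index = [] then []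
  else
    let comb := check_index.foldl (fun comb j =>
      let count := (group.getD j ('a', 0)).2
      (List.range count).foldl
        (fun tmp c => tmp ++ comb.map (fun l => l ++ [c + 1])) []) [[]]
    comb.foldl (fun cands c =>
      let word := group.zipIdx.foldl (fun w gi =>
        if gi.2 ∈ check_index then
          w ++ List.replicate (c.getD (check_index.idxOf gi.2) 0) gi.1.1
        else
          w ++ List.replicate gi.1.2 gi.1.1) []
      cands ++ [String.mk word]) []

-- ===== PORT B =====
-- Source B's recursive expand(i) over the remaining groups (recursion on the suffix list)
def pvExpand : List (Char × Nat) → List (List Char)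
  | [] => [[]]
  | (ch, n) :: gs =>
    let tails := pvExpand gs
    if n > 2 then
      tails.flatMap (fun t => ((List.range n).map (· + 1)).map (fun c => List.replicate c ch ++ t))
    else
      tails.map (fun t => List.replicate n ch ++ t)

def candidate_words_alt (sys_word : String) : List String :=
  let group := pvGroup sys_word.toList
  if group.all (fun g => g.2 ≤ 2) then []
  else (pvExpand group).map String.mk

-- ===== PRECONDITION & SPEC =====
def Spec_candidate_words (sys_word : String) (out : List String) : Prop := out = candidate_words_alt sys_word
instance (sys_word : String) (out : List String) : Decidable (Spec_candidate_words sys_word out) := by unfold Spec_candidate_words; infer_instance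

-- ===== CLAIM (what is proved, stated in full; the proofs are below) =====
def Claim_equal_candidate_words : Prop := ∀ (sys_word : String), Dom_candidate_words sys_word → Spec_candidate_words sys_word (candidate_words sys_word)

-- ===== LEMMAS AND PROOFS =====

-- proof-side helpers ---------------------------------------------------------

-- the checked indices of a group list
def chkC (g : List (Char × Nat)) : List Nat :=
  g.zipIdx.filterMap (fun gj => if gj.1.2 > 2 then some gj.2 else none)

-- the per-checked-group choice ranges, in group order
def rlist (g : List (Char × Nat)) : List (List Nat) :=
  g.filterMap (fun a => if a.2 > 2 then some ((List.range a.2).map (· + 1)) else none)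

-- cartesian product with first factor slowest (itertools.product order)
def pvCartProd : List (List Nat) → List (List Nat)
  | [] => [[]]
  | r :: rs => r.flatMap (fun x => (pvCartProd rs).map (fun t => x :: t))

-- word assembly from the per-checked-group counts u (in group order)
def render : List (Char × Nat) → List Nat → List Char
  | [], _ => []
  | (c, n) :: gs, u =>
    if n > 2 then List.replicate (u.getD 0 0) c ++ render gs u.tail
    else List.replicate n c ++ render gs u

-- 'if p then append' fold = filterMap of the same test
theorem filterMap_if_eq_filter_map {α β : Type} (p : α → Prop) [DecidablePred p]
    (f : α → β) (l : List α) :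
    l.filterMap (fun x => if p x then some (f x) else none) = (l.filter (fun x => decide (p x))).map f := by
  induction l with
  | nil => rfl
  | cons x xs ih => by_cases h : p x <;> simp [h, ih]

-- a fold that extends the accumulator is a flatMap
theorem foldl_extend_eq_flatMap {α β : Type} (g : α → List β) (l : List α) (acc : List β) :
    l.foldl (fun acc x => acc ++ g x) acc = acc ++ l.flatMap g := by
  induction l generalizing acc with
  | nil => simp
  | cons x xs ih => simp [List.foldl_cons, ih, List.flatMap_cons]

-- every member of a cartesian product has the length of the list of factors
theorem mem_pvCartProd_length (rs : List (List Nat)) (t : List Nat)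
    (h : t ∈ pvCartProd rs) : t.length = rs.length := by
  induction rs generalizing t with
  | nil => simp [pvCartProd] at h; simp [h]
  | cons r rs ih =>
    simp only [pvCartProd, List.mem_flatMap, List.mem_map] at h
    obtain ⟨x, _, u, hu, rfl⟩ := h
    simp [ih u hu]

-- appending a last (fastest-varying) factor to a cartesian product
theorem pvCartProd_append_last (rs : List (List Nat)) (r : List Nat) :
    pvCartProd (rs ++ [r]) = (pvCartProd rs).flatMap (fun t => r.map (fun x => t ++ [x])) := by
  induction rs with
  | nil =>
    simp only [List.nil_append, pvCartProd]
    induction r with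
    | nil => rfl
    | cons x r ihr => simp_all
  | cons q rs ih =>
    simp only [List.cons_append, pvCartProd, ih, List.flatMap_assoc]
    apply List.flatMap_congr
    intro x _
    simp [List.map_flatMap, List.flatMap_map, Function.comp_def]

-- shift of the checked-index list under a cons
theorem chkC_cons (a : Char × Nat) (g : List (Char × Nat)) :
    chkC (a :: g) = (if a.2 > 2 then [0] else []) ++ (chkC g).map (· + 1) := by
  unfold chkC
  rw [List.zipIdx_cons, List.zipIdx_succ, List.filterMap_cons, List.filterMap_map]
  by_cases h : a.2 > 2 <;>
    simp [h, List.map_filterMap, apply_ite (Option.map (· + 1))]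

-- idxOf through the +1 shift
theorem idxOf_map_add_one (i : Nat) (C : List Nat) :
    (C.map (· + 1)).idxOf (i + 1) = C.idxOf i := by
  induction C with
  | nil => rfl
  | cons j C ih =>
    by_cases h : i = j
    · subst h; simp
    · have hb : ((j + 1 : Nat) == i + 1) = false := by simp [Ne.symm h]
      have hb0 : ((j : Nat) == i) = false := by simp [Ne.symm h]
      simp [List.idxOf_cons, hb, hb0, ih]

-- A's comb accumulation equals the reversed-significance cartesian product
theorem comb_eq_cartProd (cnt : Nat → Nat) (C : List Nat) :
    C.foldl (fun comb j =>
        (List.range (cnt j)).foldl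
          (fun tmp c => tmp ++ comb.map (fun l => l ++ [c + 1])) []) [[]]
      = (pvCartProd ((C.map (fun j => (List.range (cnt j)).map (· + 1))).reverse)).map List.reverse := by
  induction C using List.reverseRecOn with
  | nil => simp [pvCartProd]
  | append_singleton C j ih =>
    rw [List.foldl_append, ih]
    simp only [List.foldl_cons, List.foldl_nil, List.map_append, List.map_cons, List.map_nil,
      List.reverse_append, List.reverse_cons, List.reverse_nil, List.nil_append, List.cons_append]
    rw [foldl_extend_eq_flatMap]
    simp only [pvCartProd, List.nil_append, List.map_flatMap, List.flatMap_map]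
    apply List.flatMap_congr
    intro c _
    simp [Function.comp]

-- the checked ranges fetched through getD are rlist
theorem chkC_map_rng (g : List (Char × Nat)) :
    (chkC g).map (fun j => (List.range ((g.getD j ('a', 0)).2)).map (· + 1)) = rlist g := by
  induction g with
  | nil => rfl
  | cons a g ih =>
    rw [chkC_cons, List.map_append, List.map_map]
    have hcomp : List.map ((fun j => (List.range (((a :: g).getD j ('a', 0)).2)).map (· + 1)) ∘ (· + 1))
        (chkC g) = rlist g := by
      rw [← ih]
      apply List.map_congr_left
      intro j _
      simp
    by_cases h : a.2 > 2
    · rw [if_pos h]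
      simp only [List.map_cons, List.map_nil, List.getD_cons_zero, hcomp]
      simp [rlist, h]
    · rw [if_neg h]
      simp only [List.map_nil, List.nil_append, hcomp]
      simp [rlist, h]

-- the guard: all counts ≤ 2 iff no checked index
theorem all_le_iff_chkC_nil (g : List (Char × Nat)) :
    (g.all (fun a => a.2 ≤ 2) = true) ↔ chkC g = [] := by
  induction g with
  | nil => simp [chkC]
  | cons a g ih =>
    rw [chkC_cons]
    by_cases h : a.2 > 2 <;> simp [h, ← ih] <;> omega

-- A's index-lookup word assembly is render
theorem wordbuild_eq_render (g : List (Char × Nat)) (u : List Nat)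
    (hu : u.length = (chkC g).length) :
    g.zipIdx.flatMap (fun gi =>
      if gi.2 ∈ chkC g then List.replicate (u.getD ((chkC g).idxOf gi.2) 0) gi.1.1
      else List.replicate gi.1.2 gi.1.1) = render g u := by
  induction g generalizing u with
  | nil => simp [chkC, render]
  | cons a g ih =>
    obtain ⟨c, n⟩ := a
    rw [List.zipIdx_cons, List.zipIdx_succ, List.flatMap_cons, List.flatMap_map]
    rw [chkC_cons] at hu ⊢
    by_cases h : n > 2
    · rw [if_pos h] at hu ⊢
      simp only [List.singleton_append] at hu ⊢
      cases u with
      | nil => simp at hu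
      | cons v u' =>
        have hu' : u'.length = (chkC g).length := by
          simp only [List.length_cons, List.length_map] at hu; omega
        have htail : ∀ gi : (Char × Nat) × Nat,
            (if gi.2 + 1 ∈ 0 :: (chkC g).map (· + 1) then
               List.replicate ((v :: u').getD ((0 :: (chkC g).map (· + 1)).idxOf (gi.2 + 1)) 0) gi.1.1
             else List.replicate gi.1.2 gi.1.1)
            = (if gi.2 ∈ chkC g then
                 List.replicate (u'.getD ((chkC g).idxOf gi.2) 0) gi.1.1
               else List.replicate gi.1.2 gi.1.1) := by
          intro gi
          have hmem : (gi.2 + 1 ∈ 0 :: (chkC g).map (· + 1)) ↔ gi.2 ∈ chkC g := by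
            simp
          by_cases hm : gi.2 ∈ chkC g
          · have hidx : (0 :: (chkC g).map (· + 1)).idxOf (gi.2 + 1)
                = ((chkC g).map (· + 1)).idxOf (gi.2 + 1) + 1 := by
              simp
            simp [hmem, hm, hidx, idxOf_map_add_one]
          · simp [hmem, hm]
        rw [List.flatMap_congr (fun gi _ => htail gi), ih u' hu']
        simp [render, h]

    · rw [if_neg h] at hu ⊢
      simp only [List.nil_append] at hu ⊢
      have htail : ∀ gi : (Char × Nat) × Nat,
          (if gi.2 + 1 ∈ (chkC g).map (· + 1) then
             List.replicate (u.getD (((chkC g).map (· + 1)).idxOf (gi.2 + 1)) 0) gi.1.1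
           else List.replicate gi.1.2 gi.1.1)
          = (if gi.2 ∈ chkC g then
               List.replicate (u.getD ((chkC g).idxOf gi.2) 0) gi.1.1
             else List.replicate gi.1.2 gi.1.1) := by
        intro gi
        have hmem : (gi.2 + 1 ∈ (chkC g).map (· + 1)) ↔ gi.2 ∈ chkC g := by simp
        by_cases hm : gi.2 ∈ chkC g
        · simp [hmem, hm, idxOf_map_add_one]
        · simp [hmem, hm]
      rw [List.flatMap_congr (fun gi _ => htail gi), ih u (by simpa using hu)]
      have hhead : ¬ ((0 : Nat) ∈ (chkC g).map (· + 1)) := by simp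
      simp [render, h, hhead]

-- mapping render over the product in A's order yields B's recursive expansion
theorem map_render_cartProd (g : List (Char × Nat)) :
    ((pvCartProd (rlist g).reverse).map List.reverse).map (render g) = pvExpand g := by
  induction g with
  | nil => simp [rlist, pvCartProd, render, pvExpand]
  | cons a g ih =>
    obtain ⟨c, n⟩ := a
    by_cases h : n > 2
    · have hr : rlist ((c, n) :: g) = ((List.range n).map (· + 1)) :: rlist g := by
        simp [rlist, h]
      rw [hr, List.reverse_cons, pvCartProd_append_last]
      simp only [pvExpand, h, if_true, ← ih]
      simp only [List.map_flatMap, List.flatMap_map, Function.comp_def, List.map_map]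
      apply List.flatMap_congr
      intro t _
      simp [render, h]
    · have hr : rlist ((c, n) :: g) = rlist g := by simp [rlist, h]
      rw [hr]
      simp only [pvExpand, h, if_false, ← ih]
      simp only [List.map_map, Function.comp_def]
      apply List.map_congr_left
      intro t _
      simp [render, h]

theorem candidate_words_eq (s : String) : candidate_words s = candidate_words_alt s := by
  unfold candidate_words candidate_words_alt
  simp only []
  set group := pvGroup s.toList with hg
  have hC : group.zipIdx.foldl (fun acc gj => if gj.1.2 > 2 then acc ++ [gj.2] else acc) []
      = chkC group := by
    unfold chkC
    rw [filterMap_if_eq_filter_map (fun (gj : (Char × Nat) × Nat) => gj.1.2 > 2) (fun gj => gj.2),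
      PySem.List.foldl_append_ite]
    simp
  rw [hC]
  by_cases hnil : chkC group = []
  · rw [if_pos hnil, if_pos (by exact (all_le_iff_chkC_nil group).mpr hnil)]
  · rw [if_neg hnil, if_neg (by simp [all_le_iff_chkC_nil group, hnil])]
    rw [comb_eq_cartProd (fun j => (group.getD j ('a', 0)).2) (chkC group)]
    rw [chkC_map_rng]
    rw [PySem.List.foldl_append_singleton_eq_map, List.nil_append, List.map_map]
    rw [← map_render_cartProd group, List.map_map, List.map_map]
    apply List.map_congr_left
    intro t ht
    have hlen : t.length = (rlist group).length := by
      have := mem_pvCartProd_length _ t ht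
      simpa using this
    have hlenC : t.reverse.length = (chkC group).length := by
      have : (chkC group).length = (rlist group).length := by
        rw [← chkC_map_rng group, List.length_map]
      simp [hlen, this]
    simp only [Function.comp_apply]
    congr 1
    have hfun : (fun (w : List Char) (gi : (Char × Nat) × Nat) =>
        if gi.2 ∈ chkC group then
          w ++ List.replicate (t.reverse.getD ((chkC group).idxOf gi.2) 0) gi.1.1
        else
          w ++ List.replicate gi.1.2 gi.1.1)
        = (fun w gi => w ++ (if gi.2 ∈ chkC group then
            List.replicate (t.reverse.getD ((chkC group).idxOf gi.2) 0) gi.1.1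
          else List.replicate gi.1.2 gi.1.1)) := by
      funext w gi; by_cases hm : gi.2 ∈ chkC group <;> simp [hm]
    rw [hfun, foldl_extend_eq_flatMap, List.nil_append]
    exact wordbuild_eq_render group t.reverse hlenC

-- ===== VERDICT (by name: the statement is the Claim_ definition above) =====
theorem candidate_words_spec : Claim_equal_candidate_words := by
  intro s _
  unfold Spec_candidate_words
  exact candidate_words_eq s
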